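-- pv_equiv track=rewrite | github.com/froggyNews/optionsMock | quiz.py | _streak
-- ===== SOURCE A (Python) =====
-- def _streak(correct_series):
--     streak = 0
--     for val in reversed(correct_series):
--         if val:
--             streak += 1
--         else:
--             break
--     return streak
-- ===== SOURCE B (Python) =====
-- def _streak(correct_series):
--     last_false = -1
--     for i, val in enumerate(correct_series):
--         if not val:
--             last_false = i
--     return len(correct_series) - (last_false + 1)
-- ===== Notes on version B (the rewrite author's own statement) =====
-- stated objective: alternative
-- what changed: Replaces the backward scan with early break by one forward enumerate pass that records the index of the last falsy value and derives the trailing-truthy count arithmetically as len - (last_false + 1).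
import Mathlib
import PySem

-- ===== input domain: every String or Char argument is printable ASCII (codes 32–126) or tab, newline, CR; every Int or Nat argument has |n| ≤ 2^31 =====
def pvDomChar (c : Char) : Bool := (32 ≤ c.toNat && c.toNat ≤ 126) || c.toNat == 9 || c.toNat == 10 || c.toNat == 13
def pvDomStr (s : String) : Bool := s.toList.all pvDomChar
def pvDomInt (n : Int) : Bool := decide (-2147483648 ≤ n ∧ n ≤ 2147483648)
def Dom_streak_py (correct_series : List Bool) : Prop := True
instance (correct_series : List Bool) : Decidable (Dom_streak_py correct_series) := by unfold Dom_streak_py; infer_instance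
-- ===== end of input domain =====

-- B replaces A's backward scan-with-break by one forward enumerate pass that records the
-- last falsy index and computes the trailing-truthy count arithmetically (alternative decomposition).


-- ===== PORT A =====
-- the `for val in reversed(...)` loop with break: recursion over the reversed list,
-- carrying the accumulator `streak`; `break` = returning the accumulator at a falsy value
def streakALoop : List Bool → Int → Int
  | [], streak => streak
  | v :: rest, streak => if v then streakALoop rest (streak + 1) else streak

def streak_py (correct_series : List Bool) : Int :=
  streakALoop correct_series.reverse 0

-- ===== PORT B =====
-- forward pass over enumerate, maintaining last_false
def streak_py_alt (correct_series : List Bool) : Int :=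
  let last_false :=
    (PySem.List.enumerate correct_series 0).foldl
      (fun lf p => if !p.2 then p.1 else lf) (-1)
  (correct_series.length : Int) - (last_false + 1)

-- ===== PRECONDITION & SPEC =====
def Spec_streak_py (correct_series : List Bool) (out : Int) : Prop := out = streak_py_alt correct_series
instance (correct_series : List Bool) (out : Int) : Decidable (Spec_streak_py correct_series out) := by unfold Spec_streak_py; infer_instance

-- ===== CLAIM (what is proved, stated in full; the proofs are below) =====
def Claim_equal_streak_py : Prop := ∀ (correct_series : List Bool), Dom_streak_py correct_series → Spec_streak_py correct_series (streak_py correct_series)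

-- ===== LEMMAS AND PROOFS =====

theorem streakALoop_acc (l : List Bool) (s : Int) :
    streakALoop l s = s + streakALoop l 0 := by
  induction l generalizing s with
  | nil => simp [streakALoop]
  | cons v rest ih =>
    by_cases hv : v = true
    · simp [streakALoop, hv]
      rw [ih (s + 1), ih 1]
      omega
    · simp at hv
      simp [streakALoop, hv]

theorem streak_key (l : List Bool) :
    streak_py l = streak_py_alt l := by
  induction l using List.reverseRecOn with
  | nil => simp [streak_py, streak_py_alt, streakALoop, PySem.List.enumerate]
  | append_singleton xs x ih =>
    have hA : streak_py (xs ++ [x]) =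
        if x then streak_py xs + 1 else 0 := by
      simp only [streak_py, List.reverse_append, List.reverse_singleton,
        List.singleton_append, streakALoop]
      by_cases hx : x = true
      · simp [hx, streakALoop_acc _ 1]; omega
      · simp at hx; simp [hx]
    have hfold : ∀ (s0 : Int) (lf : Int),
        (PySem.List.enumerate (xs ++ [x]) s0).foldl
          (fun lf p => if !p.2 then p.1 else lf) lf =
        (if !x then s0 + xs.length else
          (PySem.List.enumerate xs s0).foldl
            (fun lf p => if !p.2 then p.1 else lf) lf) := by
      intro s0 lf
      rw [PySem.List.enumerate_append]
      cases x <;> simp [PySem.List.enumerate]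
    cases x with
    | true =>
      rw [hA]
      simp only [if_true]
      rw [ih]
      simp only [streak_py_alt]
      rw [hfold 0 (-1)]
      simp
      try omega
    | false =>
      rw [hA]
      simp only [Bool.false_eq_true, if_false]
      simp only [streak_py_alt]
      rw [hfold 0 (-1)]
      simp

-- ===== VERDICT (by name: the statement is the Claim_ definition above) =====
theorem streak_py_spec : Claim_equal_streak_py := by
  intro l _
  unfold Spec_streak_py
  exact streak_key l
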